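-- pv_equiv track=rewrite | github.com/Michalmaciej/Sorting_Algorithms_Visualization | tim_sort.py | _merge_gen
-- ===== SOURCE A (Python) =====
-- def _merge_gen(nums, l, m, r):
--     left = nums[l:m + 1]
--     right = nums[m + 1:r + 1]
--     i = j = 0
--     k = l
--     while i < len(left) and j < len(right):
--         if left[i] <= right[j]:
--             source = l + i
--             nums[k] = left[i]
--             i += 1
--         else:
--             source = m + 1 + j
--             nums[k] = right[j]
--             j += 1
--         yield (nums.copy(), k, source, (0, 0))
--         k += 1
--     while i < len(left):
--         nums[k] = left[i]
--         yield (nums.copy(), k, l + i, (0, 0))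
--         i += 1
--         k += 1
--     while j < len(right):
--         nums[k] = right[j]
--         yield (nums.copy(), k, m + 1 + j, (0, 0))
--         j += 1
--         k += 1
-- ===== SOURCE B (Python) =====
-- def _merge_gen(nums, l, m, r):
--     left = nums[l:m + 1]
--     right = nums[m + 1:r + 1]
--     L = [(v, l + i) for i, v in enumerate(left)]
--     R = [(v, m + 1 + j) for j, v in enumerate(right)]
--     plan = []
--     i = j = 0
--     while i < len(L) and j < len(R):
--         if L[i][0] <= R[j][0]:
--             plan.append(L[i])
--             i += 1
--         else:
--             plan.append(R[j])
--             j += 1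
--     plan.extend(L[i:])
--     plan.extend(R[j:])
--     for idx, (val, src) in enumerate(plan):
--         k = l + idx
--         nums[k] = val
--         yield (nums.copy(), k, src, (0, 0))
-- ===== Notes on version B (the rewrite author's own statement) =====
-- stated objective: alternative
-- what changed: B first builds a pure merge plan of (value, source-index) pairs from the two enumerated runs and then a single emit loop performs the in-place writes and snapshot yields, replacing A's three interleaved write-and-yield loops.
import Mathlib
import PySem

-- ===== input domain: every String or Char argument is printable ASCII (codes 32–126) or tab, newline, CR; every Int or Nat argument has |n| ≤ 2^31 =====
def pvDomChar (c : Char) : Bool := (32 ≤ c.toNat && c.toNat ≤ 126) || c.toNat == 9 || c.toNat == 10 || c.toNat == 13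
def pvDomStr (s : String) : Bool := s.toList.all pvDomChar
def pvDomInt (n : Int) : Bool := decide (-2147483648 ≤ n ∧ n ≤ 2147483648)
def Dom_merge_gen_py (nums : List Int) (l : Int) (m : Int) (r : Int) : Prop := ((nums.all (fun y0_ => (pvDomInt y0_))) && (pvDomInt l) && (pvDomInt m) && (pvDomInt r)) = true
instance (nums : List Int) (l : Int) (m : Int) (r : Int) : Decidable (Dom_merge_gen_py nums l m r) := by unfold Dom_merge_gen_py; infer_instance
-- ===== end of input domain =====

-- B replaces A's three interleaved write-and-yield loops by a two-phase decomposition (a pure merge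
-- plan of (value, source) pairs, then one emit loop doing the writes/snapshots); same cost, objective
-- 'alternative'. Both versions mutate `nums` in place identically (same writes in the same order);
-- the equivalence proved is about the yielded snapshot list.
-- Each while loop is ported with a structural `fuel` counter, a pure totality guard: every call site
-- passes fuel ≥ the number of iterations the loop performs, so the 0-fuel branch is never taken.

-- ===== PORT A =====
-- first while loop: compare/write/yield while both runs remain
def aLoop1 (fuel : Nat) (left right : List Int) (l m : Int) (i j : Nat) (k : Int) (nums : List Int) :
    List (List Int × Int × Int × (Int × Int)) × Nat × Nat × Int × List Int :=
  match fuel with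
  | 0 => ([], i, j, k, nums)
  | fuel + 1 =>
    if i < left.length ∧ j < right.length then
      if left.getD i 0 ≤ right.getD j 0 then
        -- source = l + i; nums[k] = left[i]  (left[i] in range by the guard; nums[k] = pySetD, valid under Pre_)
        let nums' := PySem.List.pySetD nums k (left.getD i 0)
        let rest := aLoop1 fuel left right l m (i + 1) j (k + 1) nums'
        ((nums', k, l + (i : Int), (0, 0)) :: rest.1, rest.2)
      else
        let nums' := PySem.List.pySetD nums k (right.getD j 0)
        let rest := aLoop1 fuel left right l m i (j + 1) (k + 1) nums'
        ((nums', k, m + 1 + (j : Int), (0, 0)) :: rest.1, rest.2)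
    else ([], i, j, k, nums)

-- second while loop: drain left
def aLoop2 (fuel : Nat) (left : List Int) (l : Int) (i : Nat) (k : Int) (nums : List Int) :
    List (List Int × Int × Int × (Int × Int)) × Int × List Int :=
  match fuel with
  | 0 => ([], k, nums)
  | fuel + 1 =>
    if i < left.length then
      let nums' := PySem.List.pySetD nums k (left.getD i 0)
      let rest := aLoop2 fuel left l (i + 1) (k + 1) nums'
      ((nums', k, l + (i : Int), (0, 0)) :: rest.1, rest.2)
    else ([], k, nums)

-- third while loop: drain right (its final state is unused afterwards)
def aLoop3 (fuel : Nat) (right : List Int) (m : Int) (j : Nat) (k : Int) (nums : List Int) :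
    List (List Int × Int × Int × (Int × Int)) :=
  match fuel with
  | 0 => []
  | fuel + 1 =>
    if j < right.length then
      let nums' := PySem.List.pySetD nums k (right.getD j 0)
      (nums', k, m + 1 + (j : Int), (0, 0)) :: aLoop3 fuel right m (j + 1) (k + 1) nums'
    else []

def merge_gen_py (nums : List Int) (l : Int) (m : Int) (r : Int) : List (List Int × Int × Int × (Int × Int)) :=
  let left := PySem.List.slice nums (some l) (some (m + 1))
  let right := PySem.List.slice nums (some (m + 1)) (some (r + 1))
  let t1 := aLoop1 (left.length + right.length) left right l m 0 0 l nums
  let t2 := aLoop2 left.length left l t1.2.1 t1.2.2.2.1 t1.2.2.2.2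
  t1.1 ++ t2.1 ++ aLoop3 right.length right m t1.2.2.1 t2.2.1 t2.2.2

-- ===== PORT B =====
-- plan loop of Source B: merge the two (value, source) pair lists; the two trailing
-- `plan.extend(X[i:])` are the drops (slice with a Nat start)
def bPlan (fuel : Nat) (L R : List (Int × Int)) (i j : Nat) : List (Int × Int) :=
  match fuel with
  | 0 => L.drop i ++ R.drop j
  | fuel + 1 =>
    if i < L.length ∧ j < R.length then
      if (L.getD i (0, 0)).1 ≤ (R.getD j (0, 0)).1 then L.getD i (0, 0) :: bPlan fuel L R (i + 1) j
      else R.getD j (0, 0) :: bPlan fuel L R i (j + 1)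
    else L.drop i ++ R.drop j

-- emit loop of Source B: for idx, (val, src) in enumerate(plan): k = l + idx; nums[k] = val; yield …
def bEmit (nums : List Int) (l : Int) (idx : Nat) : List (Int × Int) → List (List Int × Int × Int × (Int × Int))
  | [] => []
  | (val, src) :: rest =>
    let k := l + (idx : Int)
    let nums' := PySem.List.pySetD nums k val
    (nums', k, src, (0, 0)) :: bEmit nums' l (idx + 1) rest

def merge_gen_py_alt (nums : List Int) (l : Int) (m : Int) (r : Int) : List (List Int × Int × Int × (Int × Int)) :=
  let left := PySem.List.slice nums (some l) (some (m + 1))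
  let right := PySem.List.slice nums (some (m + 1)) (some (r + 1))
  let L := (PySem.List.enumerate left 0).map (fun p => (p.2, l + p.1))
  let R := (PySem.List.enumerate right 0).map (fun p => (p.2, m + 1 + p.1))
  bEmit nums l 0 (bPlan (L.length + R.length) L R 0 0)

-- ===== PRECONDITION & SPEC =====
-- Pre_ excludes exactly the inputs where Python A raises IndexError: some write nums[k]
-- (k = l, l+1, …, l+t-1, t = total merged length) falls outside Python's index range [-len, len).
def Pre_merge_gen_py (nums : List Int) (l : Int) (m : Int) (r : Int) : Prop :=
  ((PySem.List.slice nums (some l) (some (m + 1))).length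
    + (PySem.List.slice nums (some (m + 1)) (some (r + 1))).length : Int) = 0 ∨
  (-(nums.length : Int) ≤ l ∧
    l + ((PySem.List.slice nums (some l) (some (m + 1))).length
      + (PySem.List.slice nums (some (m + 1)) (some (r + 1))).length : Int) ≤ (nums.length : Int))
instance (nums : List Int) (l : Int) (m : Int) (r : Int) : Decidable (Pre_merge_gen_py nums l m r) := by
  unfold Pre_merge_gen_py; infer_instance

def pvWitness_merge_gen_py : List Int × Int × Int × Int := ([3, 1, 2], 0, 0, 2)

def Spec_merge_gen_py (nums : List Int) (l : Int) (m : Int) (r : Int) (out : List (List Int × Int × Int × (Int × Int))) : Prop := out = merge_gen_py_alt nums l m r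
instance (nums : List Int) (l : Int) (m : Int) (r : Int) (out : List (List Int × Int × Int × (Int × Int))) : Decidable (Spec_merge_gen_py nums l m r out) := by unfold Spec_merge_gen_py; infer_instance

-- ===== CLAIM (what is proved, stated in full; the proofs are below) =====
def Claim_equal_merge_gen_py : Prop := ∀ (nums : List Int) (l : Int) (m : Int) (r : Int), Dom_merge_gen_py nums l m r → Pre_merge_gen_py nums l m r → Spec_merge_gen_py nums l m r (merge_gen_py nums l m r)

-- ===== LEMMAS AND PROOFS =====

-- pure reference merge of two pair lists
def pmerge : List (Int × Int) → List (Int × Int) → List (Int × Int)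
  | [], R => R
  | L, [] => L
  | a :: L, b :: R => if a.1 ≤ b.1 then a :: pmerge L (b :: R) else b :: pmerge (a :: L) R

-- reference emit, carrying the write position k directly
def emitK (nums : List Int) (k : Int) : List (Int × Int) → List (List Int × Int × Int × (Int × Int))
  | [] => []
  | (val, src) :: rest =>
    let nums' := PySem.List.pySetD nums k val
    (nums', k, src, (0, 0)) :: emitK nums' (k + 1) rest

-- each run paired with its source indices, starting at s
def pairs : List Int → Int → List (Int × Int)
  | [], _ => []
  | x :: xs, s => (x, s) :: pairs xs (s + 1)

lemma pmerge_nil_left (R : List (Int × Int)) : pmerge [] R = R := by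
  simp [pmerge]

lemma pmerge_nil_right (L : List (Int × Int)) : pmerge L [] = L := by
  cases L <;> simp [pmerge]

lemma bEmit_eq_emitK (l : Int) (plan : List (Int × Int)) : ∀ (nums : List Int) (idx : Nat),
    bEmit nums l idx plan = emitK nums (l + (idx : Int)) plan := by
  induction plan with
  | nil => intro nums idx; rfl
  | cons p rest ih =>
    intro nums idx
    obtain ⟨val, src⟩ := p
    simp only [bEmit, emitK, ih]
    have : l + ((idx + 1 : Nat) : Int) = l + (idx : Int) + 1 := by push_cast; ring
    rw [this]

lemma enum_map_eq_pairs (c : Int) (xs : List Int) : ∀ (s : Int),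
    (PySem.List.enumerate xs s).map (fun p => (p.2, c + p.1)) = pairs xs (c + s) := by
  induction xs with
  | nil => intro s; simp [PySem.List.enumerate_nil, pairs]
  | cons x xs ih =>
    intro s
    rw [PySem.List.enumerate_cons]
    simp only [List.map_cons, pairs, ih (s + 1)]
    ring_nf

lemma pairs_cons_of_lt (xs : List Int) (i : Nat) (h : i < xs.length) (s : Int) :
    pairs (xs.drop i) s = (xs[i], s) :: pairs (xs.drop (i + 1)) (s + 1) := by
  rw [List.drop_eq_getElem_cons h]
  rfl

lemma pairs_nil_of_ge (xs : List Int) (i : Nat) (h : xs.length ≤ i) (s : Int) :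
    pairs (xs.drop i) s = [] := by
  rw [List.drop_of_length_le h]
  simp [pairs]

lemma bPlan_eq_pmerge (L R : List (Int × Int)) : ∀ (c i j : Nat),
    L.length - i + (R.length - j) ≤ c →
    bPlan c L R i j = pmerge (L.drop i) (R.drop j) := by
  intro c
  induction c with
  | zero =>
    intro i j hc
    rw [bPlan, List.drop_of_length_le (by omega), List.drop_of_length_le (by omega), pmerge_nil_left]
    simp
  | succ c ih =>
    intro i j hc
    rw [bPlan]
    by_cases h : i < L.length ∧ j < R.length
    · obtain ⟨hi, hj⟩ := h
      rw [if_pos (show i < L.length ∧ j < R.length from ⟨hi, hj⟩)]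
      rw [List.drop_eq_getElem_cons hi, List.drop_eq_getElem_cons hj]
      simp only [List.getD_eq_getElem _ _ hi, List.getD_eq_getElem _ _ hj, pmerge]
      by_cases hle : (L[i]).1 ≤ (R[j]).1
      · rw [if_pos hle, if_pos hle, ih (i + 1) j (by omega)]
        rw [List.drop_eq_getElem_cons hj]
      · rw [if_neg hle, if_neg hle, ih i (j + 1) (by omega)]
        rw [List.drop_eq_getElem_cons hi]
    · rw [if_neg h]
      rcases Nat.lt_or_ge i L.length with hi | hi
      · have hj : R.length ≤ j := by omega
        rw [List.drop_of_length_le hj, pmerge_nil_right, List.append_nil]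
      · rw [List.drop_of_length_le hi, List.nil_append, pmerge_nil_left]

lemma aLoop2_of_ge (f : Nat) (left : List Int) (l : Int) (i : Nat) (k : Int) (nums : List Int)
    (hi : left.length ≤ i) : aLoop2 f left l i k nums = ([], k, nums) := by
  cases f with
  | zero => rfl
  | succ f => rw [aLoop2, if_neg (by omega)]

lemma aLoop3_of_ge (f : Nat) (right : List Int) (m : Int) (j : Nat) (k : Int) (nums : List Int)
    (hj : right.length ≤ j) : aLoop3 f right m j k nums = [] := by
  cases f with
  | zero => rfl
  | succ f => rw [aLoop3, if_neg (by omega)]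

lemma aLoop3_eq (right : List Int) (m : Int) : ∀ (c j : Nat) (k : Int) (nums : List Int),
    right.length - j ≤ c →
    aLoop3 c right m j k nums = emitK nums k (pairs (right.drop j) (m + 1 + (j : Int))) := by
  intro c
  induction c with
  | zero =>
    intro j k nums hc
    rw [aLoop3, pairs_nil_of_ge right j (by omega)]
    rfl
  | succ c ih =>
    intro j k nums hc
    rw [aLoop3]
    by_cases hj : j < right.length
    · rw [if_pos hj, pairs_cons_of_lt right j hj]
      simp only [emitK, List.getD_eq_getElem _ _ hj]
      rw [ih (j + 1) (k + 1) _ (by omega)]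
      have : m + 1 + ((j + 1 : Nat) : Int) = m + 1 + (j : Int) + 1 := by push_cast; ring
      rw [this]
    · rw [if_neg hj, pairs_nil_of_ge right j (by omega)]
      rfl

lemma aLoop2_out (left : List Int) (l : Int) : ∀ (c i : Nat) (k : Int) (nums : List Int),
    left.length - i ≤ c →
    (aLoop2 c left l i k nums).1 = emitK nums k (pairs (left.drop i) (l + (i : Int))) := by
  intro c
  induction c with
  | zero =>
    intro i k nums hc
    rw [aLoop2, pairs_nil_of_ge left i (by omega)]
    rfl
  | succ c ih =>
    intro i k nums hc
    rw [aLoop2]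
    by_cases hi : i < left.length
    · rw [if_pos hi, pairs_cons_of_lt left i hi]
      simp only [emitK, List.getD_eq_getElem _ _ hi]
      rw [ih (i + 1) (k + 1) _ (by omega)]
      have : l + ((i + 1 : Nat) : Int) = l + (i : Int) + 1 := by push_cast; ring
      rw [this]
    · rw [if_neg hi, pairs_nil_of_ge left i (by omega)]
      rfl

lemma chain_eq_aux (left right : List Int) (l m : Int) (f2 f3 : Nat)
    (hf2 : left.length ≤ f2) (hf3 : right.length ≤ f3) :
    ∀ (c i j : Nat) (k : Int) (nums : List Int),
    left.length - i + (right.length - j) ≤ c →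
    (aLoop1 c left right l m i j k nums).1
      ++ (aLoop2 f2 left l (aLoop1 c left right l m i j k nums).2.1
            (aLoop1 c left right l m i j k nums).2.2.2.1
            (aLoop1 c left right l m i j k nums).2.2.2.2).1
      ++ aLoop3 f3 right m (aLoop1 c left right l m i j k nums).2.2.1
            (aLoop2 f2 left l (aLoop1 c left right l m i j k nums).2.1
              (aLoop1 c left right l m i j k nums).2.2.2.1
              (aLoop1 c left right l m i j k nums).2.2.2.2).2.1
            (aLoop2 f2 left l (aLoop1 c left right l m i j k nums).2.1
              (aLoop1 c left right l m i j k nums).2.2.2.1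
              (aLoop1 c left right l m i j k nums).2.2.2.2).2.2
    = emitK nums k (pmerge (pairs (left.drop i) (l + (i : Int)))
                           (pairs (right.drop j) (m + 1 + (j : Int)))) := by
  intro c
  induction c with
  | zero =>
    intro i j k nums hc
    rw [aLoop1]
    simp only
    rw [aLoop2_of_ge _ _ _ _ _ _ (by omega)]
    simp only [List.nil_append]
    rw [aLoop3_of_ge _ _ _ _ _ _ (by omega), pairs_nil_of_ge left i (by omega),
      pairs_nil_of_ge right j (by omega), pmerge_nil_left]
    rfl
  | succ c ih =>
    intro i j k nums hc
    by_cases h : i < left.length ∧ j < right.length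
    · obtain ⟨hi, hj⟩ := h
      rw [aLoop1, if_pos (show i < left.length ∧ j < right.length from ⟨hi, hj⟩)]
      rw [pairs_cons_of_lt left i hi, pairs_cons_of_lt right j hj]
      simp only [List.getD_eq_getElem _ _ hi, List.getD_eq_getElem _ _ hj, pmerge]
      by_cases hle : left[i] ≤ right[j]
      · rw [if_pos hle, if_pos hle]
        simp only [emitK, List.cons_append]
        rw [ih (i + 1) j (k + 1) _ (by omega)]
        have h1 : l + ((i + 1 : Nat) : Int) = l + (i : Int) + 1 := by push_cast; ring
        rw [h1, pairs_cons_of_lt right j hj]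
      · rw [if_neg hle, if_neg hle]
        simp only [emitK, List.cons_append]
        rw [ih i (j + 1) (k + 1) _ (by omega)]
        have h1 : m + 1 + ((j + 1 : Nat) : Int) = m + 1 + (j : Int) + 1 := by push_cast; ring
        rw [h1, pairs_cons_of_lt left i hi]
    · rw [aLoop1, if_neg h]
      simp only
      rcases Nat.lt_or_ge i left.length with hi | hi
      · have hj : right.length ≤ j := by omega
        rw [pairs_nil_of_ge right j hj, pmerge_nil_right,
          aLoop3_of_ge _ _ _ _ _ _ hj, List.append_nil, List.nil_append]
        exact aLoop2_out left l f2 i k nums (by omega)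
      · rw [pairs_nil_of_ge left i hi, pmerge_nil_left,
          aLoop2_of_ge _ _ _ _ _ _ hi]
        simp only [List.nil_append]
        exact aLoop3_eq right m f3 j k nums (by omega)

-- ===== VERDICT (by name: the statement is the Claim_ definition above) =====
theorem merge_gen_py_spec : Claim_equal_merge_gen_py := by
  intro nums l m r _ _
  unfold Spec_merge_gen_py merge_gen_py merge_gen_py_alt
  simp only
  rw [bEmit_eq_emitK, bPlan_eq_pmerge _ _ _ 0 0 (by omega)]
  rw [enum_map_eq_pairs l _ 0, enum_map_eq_pairs (m + 1) _ 0]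
  have hch := chain_eq_aux (PySem.List.slice nums (some l) (some (m + 1)))
    (PySem.List.slice nums (some (m + 1)) (some (r + 1))) l m _ _ (le_refl _) (le_refl _)
    ((PySem.List.slice nums (some l) (some (m + 1))).length
      + (PySem.List.slice nums (some (m + 1)) (some (r + 1))).length) 0 0 l nums (by omega)
  simp only [List.drop_zero, Nat.cast_zero, add_zero] at hch ⊢
  exact hch
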